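-- pv_equiv track=rewrite | github.com/Venkat-267/Leety | 1611.py | minimumOneBitOperations
-- ===== SOURCE A (Python) =====
-- def minimumOneBitOperations(n: int) -> int:
--     ans = 0
--     flag = 0
--     for i in range(31, -1, -1):
--         if ((n >> i) & 1) == 1:
--             if flag == 0:
--                 ans = ans + ((1 << (i + 1))) - 1
--                 flag = 1
--             else:
--                 ans = ans - ((1 << (i + 1)) - 1)
--                 flag = 0
--     return ans
-- ===== SOURCE B (Python) =====
-- def minimumOneBitOperations(n: int) -> int:
--     # inverse Gray code: XOR-fold of the 32-bit value
--     n &= 0xFFFFFFFF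
--     ans = 0
--     while n:
--         ans ^= n
--         n >>= 1
--     return ans
-- ===== Notes on version B (the rewrite author's own statement) =====
-- stated objective: idiomatic
-- what changed: Replaces A's flag-driven alternating add/subtract scan of the bit positions with the classic inverse-Gray-code XOR fold: mask the input to its low 32-bit value, then repeatedly XOR it into an accumulator while shifting right.
import Mathlib
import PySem

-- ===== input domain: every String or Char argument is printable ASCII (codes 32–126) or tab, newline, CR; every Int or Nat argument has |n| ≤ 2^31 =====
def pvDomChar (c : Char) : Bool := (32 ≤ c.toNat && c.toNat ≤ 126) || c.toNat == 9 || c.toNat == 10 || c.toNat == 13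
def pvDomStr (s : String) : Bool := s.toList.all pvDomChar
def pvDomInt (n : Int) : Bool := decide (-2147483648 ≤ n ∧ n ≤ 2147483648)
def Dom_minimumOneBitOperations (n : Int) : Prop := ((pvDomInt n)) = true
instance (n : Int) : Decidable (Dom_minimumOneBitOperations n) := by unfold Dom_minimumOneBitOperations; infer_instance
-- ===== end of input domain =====

-- B replaces A's flag-driven add/subtract scan of bits 31..0 by the classic inverse-Gray-code
-- XOR fold of the 32-bit value (same return value; objective: idiomatic/alternative).

-- ===== PORT A =====
-- one iteration of A's for-loop; state = (ans, flag); i comes from range(31,-1,-1), so i ≥ 0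
-- and the shift amounts 'i.toNat'/'i.toNat + 1' are exactly Python's 'i'/'i + 1'
def aStep (n : Int) (st : Int × Int) (i : Int) : Int × Int :=
  if PySem.Int.band (n >>> i.toNat) 1 == 1 then
    if st.2 == 0 then (st.1 + (1 <<< (i.toNat + 1)) - 1, 1)
    else (st.1 - ((1 <<< (i.toNat + 1)) - 1), 0)
  else st

def minimumOneBitOperations (n : Int) : Int :=
  ((PySem.List.pyRange 31 (-1) (-1)).foldl (aStep n) (0, 0)).1

-- ===== PORT B =====
-- Source B's 'while n: ans ^= n; n >>= 1' on the masked (hence nonnegative, Nat-exact) value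
def xorLoop : Nat → Nat → Nat
  | 0, ans => ans
  | (m+1), ans => xorLoop ((m+1) >>> 1) (ans ^^^ (m+1))

def minimumOneBitOperations_alt (n : Int) : Int :=
  -- n &= 0xFFFFFFFF : the result is nonnegative, so .toNat is exact
  ((xorLoop (PySem.Int.band n 4294967295).toNat 0 : Nat) : Int)

-- ===== PRECONDITION & SPEC =====
def Spec_minimumOneBitOperations (n : Int) (out : Int) : Prop := out = minimumOneBitOperations_alt n
instance (n : Int) (out : Int) : Decidable (Spec_minimumOneBitOperations n out) := by unfold Spec_minimumOneBitOperations; infer_instance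

-- ===== CLAIM (what is proved, stated in full; the proofs are below) =====
def Claim_equal_minimumOneBitOperations : Prop := ∀ (n : Int), Dom_minimumOneBitOperations n → Spec_minimumOneBitOperations n (minimumOneBitOperations n)

-- ===== LEMMAS AND PROOFS =====

-- xorLoop without its accumulator
def xf : Nat → Nat
  | 0 => 0
  | (m+1) => (m+1) ^^^ xf ((m+1) >>> 1)

lemma xorLoop_eq (m : Nat) : ∀ ans, xorLoop m ans = ans ^^^ xf m := by
  induction m using Nat.strong_induction_on with
  | _ m ih =>
    intro ans
    match m with
    | 0 => simp [xorLoop, xf]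
    | (k+1) =>
      rw [xorLoop, xf, ih ((k+1) >>> 1) (by simp [Nat.shiftRight_succ]; omega), Nat.xor_assoc]

lemma xf_zero : xf 0 = 0 := by simp [xf]

lemma xf_unfold (m : Nat) : xf m = m ^^^ xf (m / 2) := by
  cases m with
  | zero => simp [xf]
  | succ k => simp [xf, Nat.shiftRight_succ]

lemma xf_lt {j m : Nat} (h : m < 2 ^ j) : xf m < 2 ^ j := by
  induction j generalizing m with
  | zero =>
    interval_cases m
    simp [xf]
  | succ j ih =>
    rw [xf_unfold]
    exact Nat.xor_lt_two_pow h
      (lt_of_lt_of_le (ih (by omega)) (Nat.pow_le_pow_right (by norm_num) (by omega)))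

lemma comp_xor {j x : Nat} (h : x < 2 ^ j) : (2 ^ j - 1) ^^^ x = 2 ^ j - 1 - x := by
  apply Nat.eq_of_testBit_eq
  intro i
  rw [show 2 ^ j - 1 - x = 2 ^ j - (x + 1) by omega]
  rw [Nat.testBit_xor, Nat.testBit_two_pow_sub_one, Nat.testBit_two_pow_sub_succ h]
  by_cases hij : i < j
  · simp [hij]
  · have hx : x.testBit i = false :=
      Nat.testBit_lt_two_pow (lt_of_lt_of_le h (Nat.pow_le_pow_right (by norm_num) (by omega)))
    simp [hij, hx]

lemma key_xor {k r : Nat} (h : r < 2 ^ k) :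
    (2 ^ k + r) ^^^ (2 ^ k - 1) = (2 ^ (k+1) - 1) ^^^ r := by
  apply Nat.eq_of_testBit_eq
  intro i
  have hadd : 2 ^ k + r = 2 ^ k ||| r := by
    have := Nat.two_pow_add_eq_or_of_lt h (i := k) 1
    simpa using this
  rw [hadd, Nat.testBit_xor, Nat.testBit_or, Nat.testBit_xor, Nat.testBit_two_pow,
    Nat.testBit_two_pow_sub_one, Nat.testBit_two_pow_sub_one]
  by_cases h1 : i < k
  · simp [h1, show i < k + 1 by omega, show ¬ (k = i) by omega]
  · have hr : r.testBit i = false :=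
      Nat.testBit_lt_two_pow (lt_of_lt_of_le h (Nat.pow_le_pow_right (by norm_num) (by omega)))
    by_cases h2 : i = k
    · subst h2; simp [hr]
    · simp [h1, hr, show ¬ (i < k + 1) by omega, show ¬ (k = i) by omega]

lemma xf_one : xf 1 = 1 := by
  rw [xf_unfold]
  norm_num [xf_zero]

-- the key bit identity behind the flag/sign bookkeeping
lemma xf_top_xor {k : Nat} : ∀ {r : Nat}, r < 2 ^ k → xf (2 ^ k + r) = (2 ^ (k+1) - 1) ^^^ xf r := by
  induction k with
  | zero =>
    intro r h
    interval_cases r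
    rw [xf_unfold]
    norm_num [show xf 0 = 0 from by simp [xf]]
  | succ k ih =>
    intro r h
    have hdiv : (2 ^ (k+1) + r) / 2 = 2 ^ k + r / 2 := by
      have h2 : (2:Nat) ^ (k+1) = 2 * 2 ^ k := by ring
      omega
    have hr2 : r / 2 < 2 ^ k := by
      have h2 : (2:Nat) ^ (k+1) = 2 * 2 ^ k := by ring
      omega
    rw [xf_unfold, hdiv, ih hr2, xf_unfold r]
    rw [← Nat.xor_assoc, ← Nat.xor_assoc]
    congr 1
    exact key_xor h

lemma xf_top {k r : Nat} (h : r < 2 ^ k) : xf (2 ^ k + r) = 2 ^ (k+1) - 1 - xf r := by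
  rw [xf_top_xor h, comp_xor (lt_of_lt_of_le (xf_lt h) (Nat.pow_le_pow_right (by norm_num) (by omega)))]

-- the 32-bit mask is reduction mod 2^32
lemma band_mask (n : Int) : PySem.Int.band n 4294967295 = n % 4294967296 := by
  rw [PySem.Int.band]
  by_cases hn : 0 ≤ n
  · simp only [hn, if_true, show (0:Int) ≤ 4294967295 by norm_num, if_true]
    obtain ⟨m, rfl⟩ := Int.eq_ofNat_of_zero_le hn
    have h1 : (m : Int).toNat &&& (4294967295 : Int).toNat = m % 2 ^ 32 := by
      have := Nat.and_two_pow_sub_one_eq_mod m 32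
      norm_num at this ⊢
      exact this
    rw [h1]
    have h2 : ((4294967296 : Nat) : Int) = 4294967296 := by norm_num
    rw [← h2, ← Int.natCast_mod]
    norm_num
  · simp only [hn, if_false, show (0:Int) ≤ 4294967295 by norm_num, if_true]
    set k := (-n - 1).toNat with hk
    have hnk : n = -((k : Int) + 1) := by
      have : (0:Int) ≤ -n - 1 := by omega
      omega
    have hand : (4294967295 : Int).toNat &&& k = k % 2 ^ 32 := by
      have h1 := Nat.and_two_pow_sub_one_eq_mod k 32
      rw [Nat.and_comm] at h1
      norm_num at h1 ⊢
      exact h1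
    rw [hand]
    have hlt : k % 2 ^ 32 < 2 ^ 32 := Nat.mod_lt _ (by norm_num)
    have hcast : ((k % 2 ^ 32 : Nat) : Int) = (k : Int) % 4294967296 := by
      rw [Int.natCast_mod]; norm_num
    have htn : ((4294967295 : Int).toNat : Int) = 4294967295 := by norm_num
    rw [hnk]
    push_cast [Nat.shiftLeft_eq]
    omega

-- bits 0..31 of n agree with the bits of (n % 2^32).toNat
lemma bit_eq (n : Int) (m : Nat) (hm : (m : Int) = n % 4294967296) (i : Nat) (hi : i ≤ 31) :
    PySem.Int.band (n >>> i) 1 = ((m / 2 ^ i) % 2 : Nat) := by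
  rw [PySem.Int.band_one, PySem.Int.mod_eq_emod_of_pos (by norm_num), Int.shiftRight_eq_div_pow]
  have hsplit : (m : Int) = n + (-(n / 4294967296) * 2 ^ (31 - i) * 2) * 2 ^ i := by
    rw [hm, Int.emod_def]
    have : (4294967296 : Int) = 2 ^ i * (2 ^ (31 - i) * 2) := by
      rw [show (4294967296 : Int) = 2 ^ 32 by norm_num, ← pow_succ, ← pow_add]
      congr 1
      omega
    rw [this]
    ring
  have hdvd : ((m : Int) / 2 ^ i) % 2 = (n / 2 ^ i) % 2 := by
    rw [hsplit, Int.add_mul_ediv_right _ _ (by positivity : (2:Int) ^ i ≠ 0)]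
    rw [show n / 2 ^ i + -(n / 4294967296) * 2 ^ (31 - i) * 2
        = n / 2 ^ i + 2 * (-(n / 4294967296) * 2 ^ (31 - i)) by ring]
    rw [Int.add_mul_emod_self_left]
  push_cast at hdvd ⊢
  omega

-- the descending index list [k, k-1, …, 0]
def topList : Nat → List Int
  | 0 => [(0 : Int)]
  | (k+1) => ((k+1 : Nat) : Int) :: topList k

lemma pyRange_topList : PySem.List.pyRange 31 (-1) (-1) = topList 31 := by decide

-- A's loop over bits k..0 computes ans ± xf (m mod 2^(k+1))
lemma foldA (n : Int) (m : Nat) (hm : (m : Int) = n % 4294967296) :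
    ∀ (k : Nat), k ≤ 31 → ∀ (ans flag : Int), flag = 0 ∨ flag = 1 →
    ((topList k).foldl (aStep n) (ans, flag)).1
      = if flag = 0 then ans + (xf (m % 2 ^ (k+1)) : Int) else ans - (xf (m % 2 ^ (k+1)) : Int) := by
  intro k
  induction k with
  | zero =>
    intro _ ans flag hflag
    have hb := bit_eq n m hm 0 (by omega)
    rw [show (2:Nat) ^ 0 = 1 from rfl, Nat.div_one] at hb
    have hm2 : m % 2 ^ (0+1) = m % 2 := by norm_num
    rw [hm2]
    rcases Nat.mod_two_eq_zero_or_one m with h2 | h2 <;> (rw [h2] at hb; norm_num at hb) <;>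
      rcases hflag with hf | hf <;> subst hf <;>
      simp [topList, aStep, h2, hb, xf_zero, xf_one] <;> ring
  | succ k ihk =>
    intro hk31 ans flag hflag
    have hb := bit_eq n m hm (k+1) (by omega)
    have hk : k ≤ 31 := by omega
    have hmod : m % 2 ^ (k+1+1) = m % 2 ^ (k+1) + 2 ^ (k+1) * (m / 2 ^ (k+1) % 2) := by
      rw [pow_succ]
      exact Nat.mod_mul
    simp only [topList, List.foldl_cons]
    rcases Nat.mod_two_eq_zero_or_one (m / 2 ^ (k+1)) with hbit | hbit
    · have hstep : aStep n (ans, flag) ((k+1 : Nat) : Int) = (ans, flag) := by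
        simp [aStep, hb, hbit]
      rw [hstep, ihk hk ans flag hflag]
      rw [show m % 2 ^ (k+1+1) = m % 2 ^ (k+1) from by rw [hmod, hbit]; simp]
    · have hrlt : m % 2 ^ (k+1) < 2 ^ (k+1) := Nat.mod_lt _ (by positivity)
      have hM : m % 2 ^ (k+1+1) = 2 ^ (k+1) + m % 2 ^ (k+1) := by rw [hmod, hbit]; omega
      have hxf : xf (m % 2 ^ (k+1+1)) = 2 ^ (k+1+1) - 1 - xf (m % 2 ^ (k+1)) := by
        rw [hM, xf_top hrlt]
      have hxlt : xf (m % 2 ^ (k+1)) < 2 ^ (k+1) := xf_lt hrlt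
      have hle : xf (m % 2 ^ (k+1)) + 1 ≤ 2 ^ (k+1+1) := by
        have h2 : (2:Nat) ^ (k+1) ≤ 2 ^ (k+1+1) := Nat.pow_le_pow_right (by norm_num) (by omega)
        omega
      have hcast : (xf (m % 2 ^ (k+1+1)) : Int)
          = ((2 ^ (k+1+1) : Nat) : Int) - 1 - (xf (m % 2 ^ (k+1)) : Int) := by
        rw [hxf]
        generalize (2:Nat) ^ (k+1+1) = P at hle ⊢
        omega
      rcases hflag with hf | hf <;> subst hf
      · have hstep : aStep n (ans, (0:Int)) ((k+1 : Nat) : Int)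
            = (ans + (1 <<< (k+1+1) : Int) - 1, 1) := by
          simp [aStep, hb, hbit]
        rw [hstep, ihk hk _ _ (Or.inr rfl)]
        simp only [if_neg (by norm_num : ¬ (1:Int) = 0), hcast]
        push_cast [Nat.shiftLeft_eq]
        ring
      · have hstep : aStep n (ans, (1:Int)) ((k+1 : Nat) : Int)
            = (ans - ((1 <<< (k+1+1) : Int) - 1), 0) := by
          simp [aStep, hb, hbit]
        rw [hstep, ihk hk _ _ (Or.inl rfl)]
        simp only [hcast]
        push_cast [Nat.shiftLeft_eq]
        ring

-- ===== VERDICT (by name: the statement is the Claim_ definition above) =====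
theorem minimumOneBitOperations_spec : Claim_equal_minimumOneBitOperations := by
  intro n _
  unfold Spec_minimumOneBitOperations
  have hnn : (0:Int) ≤ n % 4294967296 := Int.emod_nonneg n (by norm_num)
  have hm : (((n % 4294967296).toNat : Nat) : Int) = n % 4294967296 := Int.toNat_of_nonneg hnn
  have hmlt : (n % 4294967296).toNat < 4294967296 := by
    have := Int.emod_lt_of_pos n (show (0:Int) < 4294967296 by norm_num)
    omega
  rw [minimumOneBitOperations, minimumOneBitOperations_alt, pyRange_topList,
    foldA n (n % 4294967296).toNat hm 31 le_rfl 0 0 (Or.inl rfl), band_mask, xorLoop_eq]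
  rw [Nat.mod_eq_of_lt (by norm_num [hmlt] : (n % 4294967296).toNat < 2 ^ (31+1))]
  simp
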